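-- pv_equiv track=rewrite | github.com/Apolliner/Field-Mini-Game | Game_Field_master/PyGame_output_version.py | enemy_ideal_move_calculation
-- ===== SOURCE A (Python) =====
-- def enemy_ideal_move_calculation(start_point, finish_point):
--     """
--         Рассчитывает идеальную траекторию движения NPC.
--     """
--
--     axis_y = finish_point[0] - start_point[0] # длинна стороны и количество шагов
--     axis_x = finish_point[1] - start_point[1] # длинна стороны и количество шагов
--     if abs(axis_y) > abs(axis_x):
--         if axis_x != 0:
--             length_step = abs(axis_y)//abs(axis_x) # на один X столько то Y
--         else:
--             length_step = abs(axis_y)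
--         long_side = 'y'
--     else:
--         if axis_y != 0:
--             length_step = abs(axis_x)//abs(axis_y) # на один Y столько то X
--         else:
--             length_step = abs(axis_x)
--         long_side = 'x'
--
--     waypoints = [start_point]
--
--     for step in range((abs(axis_y) + abs(axis_x))):
--         if (step + 1)%(length_step + 1) == 0:
--             if long_side == 'y':
--                 if axis_y >= 0 and axis_x >= 0 or axis_y < 0 and axis_x >= 0:
--                     waypoints.append([waypoints[step][0], waypoints[step][1] + 1])
--                 else:
--                     waypoints.append([waypoints[step][0], waypoints[step][1] - 1])
--             elif long_side == 'x':
--                 if axis_x >= 0 and axis_y >= 0 or axis_x < 0 and axis_y >= 0: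
--                     waypoints.append([waypoints[step][0] + 1, waypoints[step][1]])
--                 else:
--                     waypoints.append([waypoints[step][0] - 1, waypoints[step][1]])
--         else:
--             if long_side == 'y':
--                 if axis_y >= 0 and axis_x >= 0 or axis_y >= 0 and axis_x < 0:
--                     waypoints.append([waypoints[step][0] + 1, waypoints[step][1]])
--                 else:
--                     waypoints.append([waypoints[step][0] - 1, waypoints[step][1]])
--             elif long_side == 'x':
--                 if axis_x >= 0 and axis_y >= 0 or axis_x >= 0 and axis_y < 0:
--                     waypoints.append([waypoints[step][0], waypoints[step][1] + 1])
--                 else: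
--                     waypoints.append([waypoints[step][0], waypoints[step][1] - 1])
--
--     return waypoints
-- ===== SOURCE B (Python) =====
-- def enemy_ideal_move_calculation(start_point, finish_point):
--     """Same waypoint path, but each point computed directly from its index (closed form)."""
--     axis_y = finish_point[0] - start_point[0]
--     axis_x = finish_point[1] - start_point[1]
--     if abs(axis_y) > abs(axis_x):
--         length_step = abs(axis_y) // abs(axis_x) if axis_x != 0 else abs(axis_y)
--         long_d = (1 if axis_y >= 0 else -1, 0)
--         short_d = (0, 1 if axis_x >= 0 else -1)
--     else:
--         length_step = abs(axis_x) // abs(axis_y) if axis_y != 0 else abs(axis_x)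
--         long_d = (0, 1 if axis_x >= 0 else -1)
--         short_d = (1 if axis_y >= 0 else -1, 0)
--     s0, s1 = start_point[0], start_point[1]
--     waypoints = [start_point]
--     for k in range(1, abs(axis_y) + abs(axis_x) + 1):
--         ns = k // (length_step + 1)      # short-axis steps taken among the first k moves
--         nl = k - ns                      # long-axis steps
--         waypoints.append([s0 + long_d[0] * nl + short_d[0] * ns,
--                           s1 + long_d[1] * nl + short_d[1] * ns])
--     return waypoints
-- ===== Notes on version B (the rewrite author's own statement) =====
-- stated objective: alternative
-- what changed: B computes each waypoint's absolute coordinates directly from its index via a closed form k -> start + long_delta*(k - k//(length_step+1)) + short_delta*(k//(length_step+1)), replacing A's sequential recurrence that reads the previously appended waypoint and branches on quadrant signs at every step.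
-- outside the precondition, e.g. on enemy_ideal_move_calculation([3], [1, 2]): A raises IndexError, B raises IndexError
import Mathlib
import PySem

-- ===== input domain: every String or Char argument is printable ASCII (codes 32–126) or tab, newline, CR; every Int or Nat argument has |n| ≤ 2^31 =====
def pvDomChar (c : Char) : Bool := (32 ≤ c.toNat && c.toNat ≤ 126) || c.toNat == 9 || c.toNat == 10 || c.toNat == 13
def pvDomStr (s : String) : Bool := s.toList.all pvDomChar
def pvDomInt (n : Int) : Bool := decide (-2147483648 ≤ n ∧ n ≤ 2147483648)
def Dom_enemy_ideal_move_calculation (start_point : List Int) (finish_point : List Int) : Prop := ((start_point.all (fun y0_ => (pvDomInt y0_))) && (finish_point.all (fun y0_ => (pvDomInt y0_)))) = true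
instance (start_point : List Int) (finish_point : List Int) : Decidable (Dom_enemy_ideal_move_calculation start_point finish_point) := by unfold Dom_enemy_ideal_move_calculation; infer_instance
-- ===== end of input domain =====

-- B rebuilds each waypoint directly from its index by a closed form (no sequential recurrence); objective: alternative.
-- ===== PORT A =====
-- xs[i]: under Pre_ (both input lists have ≥ 2 elements) every index below is in range, so the
-- .getD default is never reached; Python raises IndexError exactly on the inputs Pre_ excludes.
def pvGetI (xs : List Int) (i : Int) : Int := (PySem.List.pyGet? xs i).getD 0
def pvGetL (xs : List (List Int)) (i : Int) : List Int := (PySem.List.pyGet? xs i).getD []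

-- the body of A's for-loop, step for step (long_side 'y' ↦ true, 'x' ↦ false)
def pvStepA (axis_y axis_x length_step : Int) (long_side : Bool)
    (waypoints : List (List Int)) (step : Int) : List (List Int) :=
  if PySem.Int.mod (step + 1) (length_step + 1) = 0 then
    if long_side then
      if (axis_y ≥ 0 ∧ axis_x ≥ 0) ∨ (axis_y < 0 ∧ axis_x ≥ 0) then
        waypoints ++ [[pvGetI (pvGetL waypoints step) 0, pvGetI (pvGetL waypoints step) 1 + 1]]
      else
        waypoints ++ [[pvGetI (pvGetL waypoints step) 0, pvGetI (pvGetL waypoints step) 1 - 1]]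
    else
      if (axis_x ≥ 0 ∧ axis_y ≥ 0) ∨ (axis_x < 0 ∧ axis_y ≥ 0) then
        waypoints ++ [[pvGetI (pvGetL waypoints step) 0 + 1, pvGetI (pvGetL waypoints step) 1]]
      else
        waypoints ++ [[pvGetI (pvGetL waypoints step) 0 - 1, pvGetI (pvGetL waypoints step) 1]]
  else
    if long_side then
      if (axis_y ≥ 0 ∧ axis_x ≥ 0) ∨ (axis_y ≥ 0 ∧ axis_x < 0) then
        waypoints ++ [[pvGetI (pvGetL waypoints step) 0 + 1, pvGetI (pvGetL waypoints step) 1]]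
      else
        waypoints ++ [[pvGetI (pvGetL waypoints step) 0 - 1, pvGetI (pvGetL waypoints step) 1]]
    else
      if (axis_x ≥ 0 ∧ axis_y ≥ 0) ∨ (axis_x ≥ 0 ∧ axis_y < 0) then
        waypoints ++ [[pvGetI (pvGetL waypoints step) 0, pvGetI (pvGetL waypoints step) 1 + 1]]
      else
        waypoints ++ [[pvGetI (pvGetL waypoints step) 0, pvGetI (pvGetL waypoints step) 1 - 1]]

def enemy_ideal_move_calculation (start_point : List Int) (finish_point : List Int) : List (List Int) :=
  let axis_y := pvGetI finish_point 0 - pvGetI start_point 0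
  let axis_x := pvGetI finish_point 1 - pvGetI start_point 1
  let lsls : Int × Bool :=
    if |axis_y| > |axis_x| then
      (if axis_x ≠ 0 then PySem.Int.floordiv |axis_y| |axis_x| else |axis_y|, true)
    else
      (if axis_y ≠ 0 then PySem.Int.floordiv |axis_x| |axis_y| else |axis_x|, false)
  (PySem.List.pyRange 0 (|axis_y| + |axis_x|) 1).foldl
    (pvStepA axis_y axis_x lsls.1 lsls.2) [start_point]

-- ===== PORT B =====
-- waypoint number k, computed directly from its index (Source B's loop body)
def pvPoint (s0 s1 ld0 ld1 sd0 sd1 length_step : Int) (k : Int) : List Int :=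
  let ns := PySem.Int.floordiv k (length_step + 1)
  let nl := k - ns
  [s0 + ld0 * nl + sd0 * ns, s1 + ld1 * nl + sd1 * ns]

def enemy_ideal_move_calculation_alt (start_point : List Int) (finish_point : List Int) : List (List Int) :=
  let axis_y := pvGetI finish_point 0 - pvGetI start_point 0
  let axis_x := pvGetI finish_point 1 - pvGetI start_point 1
  let cfg : Int × (Int × Int) × (Int × Int) :=
    if |axis_y| > |axis_x| then
      (if axis_x ≠ 0 then PySem.Int.floordiv |axis_y| |axis_x| else |axis_y|,
       ((if axis_y ≥ 0 then 1 else -1), 0), (0, (if axis_x ≥ 0 then 1 else -1)))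
    else
      (if axis_y ≠ 0 then PySem.Int.floordiv |axis_x| |axis_y| else |axis_x|,
       (0, (if axis_x ≥ 0 then 1 else -1)), ((if axis_y ≥ 0 then 1 else -1), 0))
  let s0 := pvGetI start_point 0
  let s1 := pvGetI start_point 1
  (PySem.List.pyRange 1 (|axis_y| + |axis_x| + 1) 1).foldl
    (fun ws k => ws ++ [pvPoint s0 s1 cfg.2.1.1 cfg.2.1.2 cfg.2.2.1 cfg.2.2.2 cfg.1 k])
    [start_point]

-- ===== PRECONDITION & SPEC =====
-- Pre_ excludes exactly the inputs where Python A raises IndexError: a start or finish point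
-- with fewer than two coordinates.
def Pre_enemy_ideal_move_calculation (start_point : List Int) (finish_point : List Int) : Prop :=
  2 ≤ start_point.length ∧ 2 ≤ finish_point.length
instance (start_point : List Int) (finish_point : List Int) : Decidable (Pre_enemy_ideal_move_calculation start_point finish_point) := by unfold Pre_enemy_ideal_move_calculation; infer_instance
def pvWitness_enemy_ideal_move_calculation : List Int × List Int := ([0, 0], [5, 2])

def Spec_enemy_ideal_move_calculation (start_point : List Int) (finish_point : List Int) (out : List (List Int)) : Prop := out = enemy_ideal_move_calculation_alt start_point finish_point
instance (start_point : List Int) (finish_point : List Int) (out : List (List Int)) : Decidable (Spec_enemy_ideal_move_calculation start_point finish_point out) := by unfold Spec_enemy_ideal_move_calculation; infer_instance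

-- ===== CLAIM (what is proved, stated in full; the proofs are below) =====
def Claim_equal_enemy_ideal_move_calculation : Prop := ∀ (start_point : List Int) (finish_point : List Int), Dom_enemy_ideal_move_calculation start_point finish_point → Pre_enemy_ideal_move_calculation start_point finish_point → Spec_enemy_ideal_move_calculation start_point finish_point (enemy_ideal_move_calculation start_point finish_point)

-- ===== LEMMAS AND PROOFS =====

-- short-axis and long-axis unit deltas implicit in A's branch conditions
def pvSdel (axis_y axis_x : Int) (long_side : Bool) : Int × Int :=
  if long_side then (0, if axis_x ≥ 0 then 1 else -1) else ((if axis_y ≥ 0 then 1 else -1), 0)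
def pvLdel (axis_y axis_x : Int) (long_side : Bool) : Int × Int :=
  if long_side then ((if axis_y ≥ 0 then 1 else -1), 0) else (0, if axis_x ≥ 0 then 1 else -1)

lemma pvStepA_eq (axis_y axis_x L : Int) (ls : Bool) (ws : List (List Int)) (step : Int) :
    pvStepA axis_y axis_x L ls ws step =
      ws ++ [[pvGetI (pvGetL ws step) 0 +
                (if PySem.Int.mod (step + 1) (L + 1) = 0 then (pvSdel axis_y axis_x ls).1
                 else (pvLdel axis_y axis_x ls).1),
              pvGetI (pvGetL ws step) 1 +
                (if PySem.Int.mod (step + 1) (L + 1) = 0 then (pvSdel axis_y axis_x ls).2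
                 else (pvLdel axis_y axis_x ls).2)]] := by
  unfold pvStepA pvSdel pvLdel
  split_ifs <;> simp <;> omega

lemma pvPoint_coord0 (s0 s1 ld0 ld1 sd0 sd1 L k : Int) :
    pvGetI (pvPoint s0 s1 ld0 ld1 sd0 sd1 L k) 0 =
      s0 + ld0 * (k - PySem.Int.floordiv k (L + 1)) + sd0 * PySem.Int.floordiv k (L + 1) := by
  rfl

lemma pvPoint_coord1 (s0 s1 ld0 ld1 sd0 sd1 L k : Int) :
    pvGetI (pvPoint s0 s1 ld0 ld1 sd0 sd1 L k) 1 =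
      s1 + ld1 * (k - PySem.Int.floordiv k (L + 1)) + sd1 * PySem.Int.floordiv k (L + 1) := by
  rfl

lemma floordiv_succ_nat (L : Int) (hL : 0 ≤ L) (k : Nat) :
    PySem.Int.floordiv ((k : Int) + 1) (L + 1) =
      PySem.Int.floordiv (k : Int) (L + 1) +
        (if PySem.Int.mod ((k : Int) + 1) (L + 1) = 0 then 1 else 0) := by
  obtain ⟨M, hM⟩ : ∃ M : Nat, (L + 1) = (M : Int) := ⟨(L + 1).toNat, by omega⟩
  have hM0 : 0 < M := by omega
  have hcast : ((k : Int) + 1) = ((k + 1 : Nat) : Int) := by push_cast; ring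
  rw [hM, hcast, PySem.Int.floordiv_natCast, PySem.Int.floordiv_natCast, PySem.Int.mod_natCast]
  have hdvd : ((((k + 1) % M : Nat) : Int) = 0) ↔ (M ∣ (k + 1)) := by
    constructor
    · intro h; exact (Nat.dvd_iff_mod_eq_zero ..).mpr (by exact_mod_cast h)
    · intro h; simp [Nat.mod_eq_zero_of_dvd h]
  rw [Nat.succ_div]
  by_cases h : M ∣ (k + 1)
  · simp [hdvd.mpr, h]
  · have h2 : ¬ ((((k + 1) % M : Nat) : Int) = 0) := fun hc => h (hdvd.mp hc)
    simp [h2, h]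
    rw [hcast]
    exact_mod_cast h

lemma pvPoint_succ (s0 s1 ld0 ld1 sd0 sd1 L : Int) (hL : 0 ≤ L) (k : Nat) :
    pvPoint s0 s1 ld0 ld1 sd0 sd1 L ((k : Int) + 1) =
      [pvGetI (pvPoint s0 s1 ld0 ld1 sd0 sd1 L (k : Int)) 0 +
         (if PySem.Int.mod ((k : Int) + 1) (L + 1) = 0 then sd0 else ld0),
       pvGetI (pvPoint s0 s1 ld0 ld1 sd0 sd1 L (k : Int)) 1 +
         (if PySem.Int.mod ((k : Int) + 1) (L + 1) = 0 then sd1 else ld1)] := by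
  rw [pvPoint_coord0, pvPoint_coord1]
  unfold pvPoint
  rw [floordiv_succ_nat L hL k]
  split_ifs <;> simp only [List.cons.injEq, and_true] <;> constructor <;> ring

lemma pvPoint_zero (s0 s1 ld0 ld1 sd0 sd1 L : Int) (hL : 0 ≤ L) :
    pvPoint s0 s1 ld0 ld1 sd0 sd1 L 0 = [s0, s1] := by
  have h1 : PySem.Int.floordiv 0 (L + 1) = 0 := by
    rw [PySem.Int.floordiv_eq_ediv_of_pos (by omega)]; simp
  simp [pvPoint, h1]

-- generic fold-append characterisation
lemma foldl_append_map {α : Type} (g : α → List Int) :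
    ∀ (l : List α) (init : List (List Int)),
      l.foldl (fun ws k => ws ++ [g k]) init = init ++ l.map g := by
  intro l
  induction l with
  | nil => intro init; simp
  | cons x xs ih => intro init; simp [List.foldl_cons, ih]

-- B's loop builds start_point followed by the closed-form points
lemma loopB (g : Int → List Int) (sp : List Int) (n : Nat) :
    (PySem.List.pyRange 1 ((n : Int) + 1) 1).foldl (fun ws k => ws ++ [g k]) [sp] =
      sp :: (List.range n).map (fun i : Nat => g ((i : Int) + 1)) := by
  rw [foldl_append_map, PySem.List.pyRange_one]
  have h1 : ((n : Int) + 1 - 1).toNat = n := by omega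
  rw [h1, List.map_map]
  simp [Function.comp_def, add_comm]

-- A's loop invariant: after n steps the waypoint list is start_point followed by the closed-form points
lemma loopA (axis_y axis_x L : Int) (ls : Bool) (sp : List Int) (hL : 0 ≤ L) (n : Nat) :
    (PySem.List.pyRange 0 (n : Int) 1).foldl (pvStepA axis_y axis_x L ls) [sp] =
      sp :: (List.range n).map (fun i : Nat =>
        pvPoint (pvGetI sp 0) (pvGetI sp 1) (pvLdel axis_y axis_x ls).1 (pvLdel axis_y axis_x ls).2
          (pvSdel axis_y axis_x ls).1 (pvSdel axis_y axis_x ls).2 L ((i : Int) + 1)) := by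
  induction n with
  | zero => simp [PySem.List.pyRange_one]
  | succ n ih =>
    have hrange : PySem.List.pyRange 0 ((n : Int) + 1) 1 =
        PySem.List.pyRange 0 (n : Int) 1 ++ [(n : Int)] := by
      rw [PySem.List.pyRange_one, PySem.List.pyRange_one]
      have h1 : ((n : Int) + 1 - 0).toNat = n + 1 := by omega
      have h2 : ((n : Int) - 0).toNat = n := by omega
      rw [h1, h2, List.range_succ]
      simp
    have hcast : ((n + 1 : Nat) : Int) = (n : Int) + 1 := by push_cast; ring
    rw [hcast, hrange, List.foldl_append, ih]
    simp only [List.foldl_cons, List.foldl_nil]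
    rw [pvStepA_eq]
    have hget : ∀ j : Int, j = 0 ∨ j = 1 →
        pvGetI (pvGetL (sp :: (List.range n).map (fun i : Nat =>
          pvPoint (pvGetI sp 0) (pvGetI sp 1) (pvLdel axis_y axis_x ls).1 (pvLdel axis_y axis_x ls).2
            (pvSdel axis_y axis_x ls).1 (pvSdel axis_y axis_x ls).2 L ((i : Int) + 1))) (n : Int)) j =
        pvGetI (pvPoint (pvGetI sp 0) (pvGetI sp 1) (pvLdel axis_y axis_x ls).1 (pvLdel axis_y axis_x ls).2
            (pvSdel axis_y axis_x ls).1 (pvSdel axis_y axis_x ls).2 L (n : Int)) j := by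
      intro j hj
      cases n with
      | zero =>
        simp only [Nat.cast_zero]
        rw [pvPoint_zero _ _ _ _ _ _ _ hL]
        rcases hj with hj | hj <;> subst hj <;>
          simp [pvGetL, pvGetI, PySem.List.pyGet?, PySem.List.pyIdx?]
      | succ m =>
        have hc : ((m + 1 : Nat) : Int) = ((m : Int) + 1) := by push_cast; ring
        simp [pvGetL, PySem.List.pyGet?_natCast, hc]
    rw [hget 0 (Or.inl rfl), hget 1 (Or.inr rfl), List.range_succ]
    simp only [List.map_append, List.map_cons, List.map_nil]
    rw [pvPoint_succ _ _ _ _ _ _ _ hL n]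
    simp

-- both loops, directly against each other (per fixed branch data)
lemma both_sides (axis_y axis_x L : Int) (ls : Bool) (sp : List Int) (hL : 0 ≤ L) (n : Nat) :
    (PySem.List.pyRange 0 (n : Int) 1).foldl (pvStepA axis_y axis_x L ls) [sp] =
      (PySem.List.pyRange 1 ((n : Int) + 1) 1).foldl
        (fun ws k => ws ++ [pvPoint (pvGetI sp 0) (pvGetI sp 1)
          (pvLdel axis_y axis_x ls).1 (pvLdel axis_y axis_x ls).2
          (pvSdel axis_y axis_x ls).1 (pvSdel axis_y axis_x ls).2 L k]) [sp] := by
  rw [loopA axis_y axis_x L ls sp hL n, loopB]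

-- L is nonnegative in every branch
lemma floordiv_abs_nonneg (a b : Int) (hb : b ≠ 0) : 0 ≤ PySem.Int.floordiv |a| |b| := by
  rw [PySem.Int.floordiv_eq_ediv_of_pos (by positivity)]
  exact Int.ediv_nonneg (abs_nonneg a) (abs_nonneg b)

-- ===== VERDICT (by name: the statement is the Claim_ definition above) =====
theorem enemy_ideal_move_calculation_spec : Claim_equal_enemy_ideal_move_calculation := by
  intro start_point finish_point _ _
  unfold Spec_enemy_ideal_move_calculation
  simp only [enemy_ideal_move_calculation, enemy_ideal_move_calculation_alt]
  set ay := pvGetI finish_point 0 - pvGetI start_point 0 with hay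
  set ax := pvGetI finish_point 1 - pvGetI start_point 1 with hax
  obtain ⟨n, hn⟩ : ∃ n : Nat, |ay| + |ax| = (n : Int) := ⟨(|ay| + |ax|).toNat, by
    have := abs_nonneg ay; have := abs_nonneg ax; omega⟩
  rw [hn]
  by_cases h1 : |ay| > |ax|
  · rw [if_pos h1, if_pos h1]
    by_cases h2 : ax ≠ 0
    · rw [if_pos h2]
      simpa [pvLdel, pvSdel] using both_sides ay ax (PySem.Int.floordiv |ay| |ax|) true
        start_point (floordiv_abs_nonneg ay ax h2) n
    · rw [if_neg h2]
      simpa [pvLdel, pvSdel] using both_sides ay ax |ay| true start_point (abs_nonneg ay) n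
  · rw [if_neg h1, if_neg h1]
    by_cases h2 : ay ≠ 0
    · rw [if_pos h2]
      simpa [pvLdel, pvSdel] using both_sides ay ax (PySem.Int.floordiv |ax| |ay|) false
        start_point (floordiv_abs_nonneg ax ay h2) n
    · rw [if_neg h2]
      simpa [pvLdel, pvSdel] using both_sides ay ax |ax| false start_point (abs_nonneg ax) n
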